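-- pv_equiv track=rewrite | github.com/DmitryBalakin54/Itmo | programs/term5/AnDan/cf/E/main.py | calculate_distances
-- ===== SOURCE A (Python) =====
-- def calculate_distances(data):
--     classes = {}
--     for x, y in data:
--         if y not in classes:
--             classes[y] = []
--         classes[y].append(x)
--
--     intra_class_distance = 0
--     for values in classes.values():
--         if not sorted(values) == values and not sorted(values, reverse=True) == values:
--             values.sort(reverse=True)
--         n = len(values)
--         m = n - 1
--         a = 0
--         b = 0
--         for i in range(n - 1):
--             a += values[i] * (m - i)
--             b += values[i + 1] * (i + 1)
--         intra_class_distance += abs(a - b)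
--
--     all_values = [x for x, _ in data]
--     if not sorted(all_values) == all_values and not sorted(all_values, reverse=True) == all_values:
--         all_values.sort(reverse=True)
--     n = len(all_values)
--     m = n - 1
--     a = 0
--     b = 0
--     for i in range(n - 1):
--         a += all_values[i] * (m - i)
--         b += all_values[i + 1] * (i + 1)
--     total_distance = abs(a - b)
--
--     inter_class_distance = total_distance - intra_class_distance
--     return 2 * intra_class_distance, 2 * inter_class_distance
-- ===== SOURCE B (Python) =====
-- def calculate_distances(data):
--     classes = {}
--     for x, y in data:
--         if y not in classes:
--             classes[y] = []
--         classes[y].append(x)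
--
--     def pairwise(values):
--         s = 0
--         for i, v in enumerate(values):
--             for w in values[i + 1:]:
--                 s += abs(v - w)
--         return s
--
--     intra_class_distance = 0
--     for values in classes.values():
--         intra_class_distance += pairwise(values)
--
--     total_distance = pairwise([x for x, _ in data])
--     inter_class_distance = total_distance - intra_class_distance
--     return 2 * intra_class_distance, 2 * inter_class_distance
-- ===== Notes on version B (the rewrite author's own statement) =====
-- stated objective: simpler
-- what changed: A's conditional reverse-sort plus prefix-coefficient accumulator trick (a/b loop and abs(a-b)) is replaced by a direct double loop summing abs(values[i]-values[j]) over all pairs i<j, with no sorting at all.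
import Mathlib
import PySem

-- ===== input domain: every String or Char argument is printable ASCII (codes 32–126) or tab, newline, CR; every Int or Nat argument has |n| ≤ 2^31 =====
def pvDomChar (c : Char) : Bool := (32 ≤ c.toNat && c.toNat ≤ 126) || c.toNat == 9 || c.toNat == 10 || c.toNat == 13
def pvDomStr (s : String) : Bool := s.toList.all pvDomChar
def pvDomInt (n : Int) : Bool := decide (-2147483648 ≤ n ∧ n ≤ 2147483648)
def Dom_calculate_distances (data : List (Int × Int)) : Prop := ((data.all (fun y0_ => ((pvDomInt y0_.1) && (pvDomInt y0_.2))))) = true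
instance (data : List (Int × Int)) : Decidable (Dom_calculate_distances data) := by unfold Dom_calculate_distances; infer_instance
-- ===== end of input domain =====

-- B replaces A's sort-plus-prefix-coefficient trick by the direct double loop over all pairs i<j
-- summing |v_i - v_j| (objective: simpler; equivalence proved, no speed claim).

-- ===== PORT A =====
-- grouping loop shared by both ports: both Pythons build `classes` with the identical
-- `if y not in classes: classes[y] = []; classes[y].append(x)` loop
def pvGroup (data : List (Int × Int)) : PySem.Dict Int (List Int) :=
  data.foldl (fun classes p =>
      (if ¬ (classes.contains p.2) then classes.insert p.2 [] else classes).modify p.2 []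
        (fun l => l ++ [p.1]))
    PySem.Dict.empty

-- A's per-list block: conditional reverse sort, then the a/b coefficient loop, then abs(a-b);
-- identical Python code is applied to each class list and to all_values, so it is one helper
def pvTri (values0 : List Int) : Int :=
  let values :=
    if ¬ (PySem.List.sorted values0 (fun v => v) = values0) ∧
       ¬ (PySem.List.sorted values0 (fun v => v) true = values0)
    then PySem.List.sorted values0 (fun v => v) true else values0
  let n : Int := values.length
  let m : Int := n - 1
  let ab := (PySem.List.pyRange 0 (n - 1) 1).foldl
    (fun ab i => (ab.1 + PySem.List.pyGetD values i 0 * (m - i),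
                  ab.2 + PySem.List.pyGetD values (i + 1) 0 * (i + 1))) (0, 0)
  |ab.1 - ab.2|

def calculate_distances (data : List (Int × Int)) : Int × Int :=
  let classes := pvGroup data
  let intra_class_distance := classes.values.foldl (fun acc values => acc + pvTri values) 0
  let all_values := data.map (fun p => p.1)
  let total_distance := pvTri all_values
  let inter_class_distance := total_distance - intra_class_distance
  (2 * intra_class_distance, 2 * inter_class_distance)

-- ===== PORT B =====
-- Source B's pairwise: for i, v in enumerate(values): for w in values[i+1:]: s += abs(v - w)
def pvPairwise (values : List Int) : Int :=
  (PySem.List.enumerate values).foldl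
    (fun s p => (PySem.List.slice values (some (p.1 + 1)) none).foldl
      (fun t w => t + |p.2 - w|) s) 0

def calculate_distances_alt (data : List (Int × Int)) : Int × Int :=
  let classes := pvGroup data
  let intra_class_distance := classes.values.foldl (fun acc values => acc + pvPairwise values) 0
  let total_distance := pvPairwise (data.map (fun p => p.1))
  let inter_class_distance := total_distance - intra_class_distance
  (2 * intra_class_distance, 2 * inter_class_distance)

-- ===== PRECONDITION & SPEC =====
def Spec_calculate_distances (data : List (Int × Int)) (out : Int × Int) : Prop := out = calculate_distances_alt data
instance (data : List (Int × Int)) (out : Int × Int) : Decidable (Spec_calculate_distances data out) := by unfold Spec_calculate_distances; infer_instance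

-- ===== CLAIM (what is proved, stated in full; the proofs are below) =====
def Claim_equal_calculate_distances : Prop := ∀ (data : List (Int × Int)), Dom_calculate_distances data → Spec_calculate_distances data (calculate_distances data)

-- ===== LEMMAS AND PROOFS =====

-- sum over all pairs i<j of |v_i - v_j|, structurally
def pairAbs : List Int → Int
  | [] => 0
  | x :: xs => (xs.map (fun y => |x - y|)).sum + pairAbs xs

-- sum over all pairs i<j of (v_i - v_j), structurally
def signed : List Int → Int
  | [] => 0
  | x :: xs => (xs.map (fun y => x - y)).sum + signed xs

theorem sum_map_sub_const (xs : List Int) (x : Int) :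
    (xs.map (fun y => x - y)).sum = xs.length * x - xs.sum := by
  induction xs with
  | nil => simp
  | cons y ys ih => simp [ih]; ring

theorem sum_map_getD_succ (xs : List Int) :
    ((List.range xs.length).map (fun k => xs.getD (k + 1) 0)).sum = xs.sum - xs.getD 0 0 := by
  induction xs with
  | nil => simp
  | cons y ys ih =>
    cases ys with
    | nil => simp
    | cons z zs =>
      rw [List.length_cons, List.range_succ_eq_map, List.map_cons, List.map_map]
      have : ((List.range (z :: zs).length).map
          ((fun k => (y :: z :: zs).getD (k + 1) 0) ∘ Nat.succ)).sum
          = ((List.range (z :: zs).length).map (fun k => (z :: zs).getD (k + 1) 0)).sum := by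
        exact congrArg List.sum (List.map_congr_left (fun k _ => rfl))
      simp only [List.sum_cons, this, ih]
      simp

-- the a/b coefficient sum equals the signed pair sum
theorem tri_sum_nat (l : List Int) :
    ((List.range (l.length - 1)).map
      (fun k => l.getD k 0 * (((l.length : Int) - 1) - k) - l.getD (k + 1) 0 * ((k : Int) + 1))).sum
      = signed l := by
  induction l with
  | nil => simp [signed]
  | cons x xs ih =>
    cases xs with
    | nil => simp [signed]
    | cons y ys =>
      set t := y :: ys with ht
      have hlen : (x :: t).length - 1 = t.length := by simp
      rw [hlen]
      have hlen2 : t.length = (t.length - 1) + 1 := by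
        rw [ht]; simp
      rw [hlen2, List.range_succ_eq_map, List.map_cons, List.map_map]
      have hcomp : ((List.range (t.length - 1)).map
          ((fun k => (x :: t).getD k 0 * (((x :: t).length : Int) - 1 - k)
              - (x :: t).getD (k + 1) 0 * ((k : Int) + 1)) ∘ Nat.succ)).sum
          = ((List.range (t.length - 1)).map
          (fun k => (t.getD k 0 * (((t.length : Int) - 1) - k) - t.getD (k + 1) 0 * ((k : Int) + 1))
              - t.getD (k + 1) 0)).sum := by
        refine congrArg List.sum (List.map_congr_left (fun k _ => ?_))
        simp only [Function.comp, Nat.succ_eq_add_one, List.getD_cons_succ, List.length_cons]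
        push_cast
        ring
      have hsplit : ∀ (f g : Nat → Int) (L : List Nat),
          (L.map (fun k => f k - g k)).sum = (L.map f).sum - (L.map g).sum := by
        intro f g L
        induction L with
        | nil => simp
        | cons a as ihL => simp only [List.map_cons, List.sum_cons]; omega
      have hsh : ((List.range (t.length - 1)).map (fun k => t.getD (k + 1) 0)).sum
          = t.sum - t.getD 0 0 := by
        -- sum_map_getD_succ runs over range t.length; the extra index reads past the end
        have h := sum_map_getD_succ t
        rw [hlen2, List.range_succ, List.map_append, List.sum_append] at h
        have hz : t.getD (t.length - 1 + 1) 0 = 0 := by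
          apply List.getD_eq_default
          omega
        simp only [List.map_cons, List.map_nil, List.sum_cons, List.sum_nil, hz] at h
        omega
      rw [List.sum_cons, hcomp,
        hsplit (fun k => t.getD k 0 * (((t.length : Int) - 1) - (k : Int)) - t.getD (k + 1) 0 * ((k : Int) + 1))
          (fun k => t.getD (k + 1) 0), ih, hsh]
      have hsigned : signed (x :: t) = (t.map (fun y => x - y)).sum + signed t := rfl
      rw [hsigned, sum_map_sub_const]
      simp only [List.getD_cons_zero, List.getD_cons_succ, List.length_cons, Nat.cast_add,
        Nat.cast_one, Nat.cast_zero]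
      push_cast
      ring

theorem signed_desc (l : List Int) (h : l.Pairwise (fun a b => b ≤ a)) : signed l = pairAbs l := by
  induction l with
  | nil => rfl
  | cons x xs ih =>
    rw [List.pairwise_cons] at h
    have hmap : xs.map (fun y => x - y) = xs.map (fun y => |x - y|) := by
      refine List.map_congr_left (fun y hy => ?_)
      rw [abs_of_nonneg (by have := h.1 y hy; omega)]
    simp only [signed, pairAbs, hmap, ih h.2]

theorem sum_map_neg {β : Type} (L : List β) (f : β → Int) :
    (L.map (fun y => -f y)).sum = -(L.map f).sum := by
  induction L with
  | nil => simp
  | cons a as ih => simp only [List.map_cons, List.sum_cons, ih]; ring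

theorem signed_asc (l : List Int) (h : l.Pairwise (fun a b => a ≤ b)) : signed l = -pairAbs l := by
  induction l with
  | nil => rfl
  | cons x xs ih =>
    rw [List.pairwise_cons] at h
    have hmap : xs.map (fun y => x - y) = xs.map (fun y => -|x - y|) := by
      refine List.map_congr_left (fun y hy => ?_)
      rw [abs_of_nonpos (by have := h.1 y hy; omega)]
      ring
    simp only [signed, pairAbs, hmap, ih h.2, sum_map_neg]
    ring

theorem pairAbs_nonneg (l : List Int) : 0 ≤ pairAbs l := by
  induction l with
  | nil => simp [pairAbs]
  | cons x xs ih =>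
    have : 0 ≤ (xs.map (fun y => |x - y|)).sum := by
      apply List.sum_nonneg
      intro a ha
      rcases List.mem_map.mp ha with ⟨y, _, rfl⟩
      exact abs_nonneg _
    simp only [pairAbs]
    omega

theorem pairAbs_perm (l l' : List Int) (h : l.Perm l') : pairAbs l = pairAbs l' := by
  induction h with
  | nil => rfl
  | cons x hp ih =>
    simp only [pairAbs, ih, (hp.map (fun y => |x - y|)).sum_eq]
  | swap x y l =>
    simp only [pairAbs, List.map_cons, List.sum_cons]
    rw [abs_sub_comm]
    ring
  | trans _ _ ih1 ih2 => rw [ih1, ih2]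

-- A's per-list block computes the pairwise absolute-distance sum
theorem pvTri_eq (l : List Int) : pvTri l = pairAbs l := by
  unfold pvTri
  have key : ∀ (v : List Int), v.Perm l →
      (v.Pairwise (fun a b : Int => a ≤ b) ∨ v.Pairwise (fun a b : Int => b ≤ a)) →
      |((PySem.List.pyRange 0 ((v.length : Int) - 1) 1).foldl
        (fun ab i => (ab.1 + PySem.List.pyGetD v i 0 * (((v.length : Int) - 1) - i),
                      ab.2 + PySem.List.pyGetD v (i + 1) 0 * (i + 1))) ((0 : Int), (0 : Int))).1
        - ((PySem.List.pyRange 0 ((v.length : Int) - 1) 1).foldl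
        (fun ab i => (ab.1 + PySem.List.pyGetD v i 0 * (((v.length : Int) - 1) - i),
                      ab.2 + PySem.List.pyGetD v (i + 1) 0 * (i + 1))) ((0 : Int), (0 : Int))).2|
        = pairAbs l := by
    intro v hperm hmono
    rw [PySem.List.foldl_prod_mk
      (f := fun acc i => acc + PySem.List.pyGetD v i 0 * (((v.length : Int) - 1) - i))
      (g := fun acc i => acc + PySem.List.pyGetD v (i + 1) 0 * (i + 1))]
    simp only [PySem.List.foldl_add, zero_add]
    have hsum : ((PySem.List.pyRange 0 ((v.length : Int) - 1) 1).map
          (fun i => PySem.List.pyGetD v i 0 * (((v.length : Int) - 1) - i))).sum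
        - ((PySem.List.pyRange 0 ((v.length : Int) - 1) 1).map
          (fun i => PySem.List.pyGetD v (i + 1) 0 * (i + 1))).sum
        = signed v := by
      have hsplit : ∀ (f g : Int → Int) (L : List Int),
          (L.map f).sum - (L.map g).sum = (L.map (fun k => f k - g k)).sum := by
        intro f g L
        induction L with
        | nil => simp
        | cons a as ihL => simp only [List.map_cons, List.sum_cons]; omega
      rw [hsplit]
      rw [PySem.List.pyRange_one, List.map_map]
      have htn : (((v.length : Int) - 1) - 0).toNat = v.length - 1 := by omega
      rw [htn]
      have := tri_sum_nat v
      rw [← this]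
      refine congrArg List.sum (List.map_congr_left (fun k _ => ?_))
      simp only [Function.comp, zero_add, PySem.List.pyGetD_natCast]
      have : ((k : Int) + 1) = (((k + 1 : Nat) : Int)) := by push_cast; ring
      rw [this, PySem.List.pyGetD_natCast]
    rw [hsum]
    rcases hmono with hasc | hdesc
    · rw [signed_asc v hasc, abs_neg, abs_of_nonneg (pairAbs_nonneg v), pairAbs_perm v l hperm]
    · rw [signed_desc v hdesc, abs_of_nonneg (pairAbs_nonneg v), pairAbs_perm v l hperm]
  by_cases hc : ¬ (PySem.List.sorted l (fun v => v) = l) ∧ ¬ (PySem.List.sorted l (fun v => v) true = l)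
  · simp only [if_pos hc]
    exact key _ (PySem.List.sorted_perm l (fun v => v) true)
      (Or.inr (PySem.List.sorted_pairwise_rev l (fun v => v)))
  · simp only [if_neg hc]
    rcases Decidable.not_and_iff_not_or_not.mp hc with h1 | h1 <;> rw [not_not] at h1
    · exact key l (List.Perm.refl l) (Or.inl (by rw [← h1]; exact PySem.List.sorted_pairwise l _))
    · exact key l (List.Perm.refl l) (Or.inr (by rw [← h1]; exact PySem.List.sorted_pairwise_rev l _))

-- B's double loop computes the pairwise absolute-distance sum
theorem drop_sum (l : List Int) :
    ((List.range l.length).map (fun k => ((l.drop (k + 1)).map (fun w => |l.getD k 0 - w|)).sum)).sum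
      = pairAbs l := by
  induction l with
  | nil => rfl
  | cons x xs ih =>
    rw [List.length_cons, List.range_succ_eq_map, List.map_cons, List.map_map]
    have hcomp : ((List.range xs.length).map
        ((fun k => (((x :: xs).drop (k + 1)).map (fun w => |(x :: xs).getD k 0 - w|)).sum) ∘ Nat.succ)).sum
        = ((List.range xs.length).map (fun k => ((xs.drop (k + 1)).map (fun w => |xs.getD k 0 - w|)).sum)).sum := by
      exact congrArg List.sum (List.map_congr_left (fun k _ => rfl))
    simp only [List.sum_cons, hcomp, ih]
    rfl

theorem pvPairwise_eq (l : List Int) : pvPairwise l = pairAbs l := by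
  unfold pvPairwise
  simp only [PySem.List.foldl_add, zero_add]
  rw [PySem.List.enumerate_eq_map_pyRange l 0]
  simp only [List.map_map, PySem.List.len_eq, PySem.List.pyRange_one]
  have h0 : (((l.length : Int)) - 0).toNat = l.length := by omega
  rw [h0, ← drop_sum l]
  refine congrArg List.sum (List.map_congr_left (fun k hk => ?_))
  rw [List.mem_range] at hk
  simp only [Function.comp, zero_add, PySem.List.pyGetD_natCast]
  have h1 : ((k : Int) + 1) = (((k + 1 : Nat) : Int)) := by push_cast; ring
  rw [h1, PySem.List.slice_from l (by positivity), Int.toNat_natCast]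

theorem pvTri_eq_pvPairwise : pvTri = pvPairwise := by
  funext l
  rw [pvTri_eq, pvPairwise_eq]

-- ===== VERDICT (by name: the statement is the Claim_ definition above) =====
theorem calculate_distances_spec : Claim_equal_calculate_distances := by
  intro data _
  unfold Spec_calculate_distances calculate_distances calculate_distances_alt
  rw [pvTri_eq_pvPairwise]
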